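-- pv_equiv track=rewrite | github.com/kevenxz/wetchatOffcial | workflow/skills/generate_visual_assets.py | _insert_illustration_placeholders
-- ===== SOURCE A (Python) =====
-- def _insert_illustration_placeholders(content: str, illustration_count: int) -> str:
--     if illustration_count <= 0:
--         return content
--
--     lines = content.splitlines()
--     heading_indexes = [index for index, line in enumerate(lines) if line.startswith("## ")]
--     if not heading_indexes:
--         suffix = "\n\n" if content.strip() else ""
--         placeholders = "\n\n".join(f"[插图{index}]" for index in range(1, illustration_count + 1))
--         return f"{content}{suffix}{placeholders}".strip()
--
--     inserts: list[tuple[int, str]] = []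
--     for idx in range(illustration_count):
--         heading_index = heading_indexes[min(idx, len(heading_indexes) - 1)]
--         insert_at = heading_index + 2 if heading_index + 1 < len(lines) else heading_index + 1
--         inserts.append((insert_at, f"[插图{idx + 1}]"))
--
--     offset = 0
--     next_lines = list(lines)
--     for insert_at, placeholder in inserts:
--         next_lines.insert(insert_at + offset, "")
--         next_lines.insert(insert_at + offset + 1, placeholder)
--         offset += 2
--     return "\n".join(next_lines)
-- ===== SOURCE B (Python) =====
-- def _insert_illustration_placeholders(content: str, illustration_count: int) -> str:
--     if illustration_count <= 0:
--         return content
--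
--     lines = content.splitlines()
--     headings = [index for index, line in enumerate(lines) if line.startswith("## ")]
--     if not headings:
--         suffix = "\n\n" if content.strip() else ""
--         placeholders = "\n\n".join(f"[插图{index}]" for index in range(1, illustration_count + 1))
--         return f"{content}{suffix}{placeholders}".strip()
--
--     # one sorted queue of insert positions (original-line coordinates), then a
--     # single merge pass over the lines: no mutable offset, no list.insert.
--     last = headings[-1]
--     positions = []
--     for idx in range(illustration_count):
--         heading = headings[idx] if idx < len(headings) else last
--         positions.append(heading + 2 if heading + 1 < len(lines) else heading + 1)
--
--     out = []
--     j = 0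
--     for i, line in enumerate(lines):
--         while j < len(positions) and positions[j] == i:
--             out.append("")
--             out.append(f"[插图{j + 1}]")
--             j += 1
--         out.append(line)
--     while j < len(positions):
--         out.append("")
--         out.append(f"[插图{j + 1}]")
--         j += 1
--     return "\n".join(out)
-- ===== Notes on version B (the rewrite author's own statement) =====
-- stated objective: alternative
-- what changed: The heading branch no longer mutates the list with repeated list.insert and a running offset: B precomputes the sorted queue of insert positions and builds the output in a single merge pass over the original lines, appending queued placeholders before the matching line.
import Mathlib
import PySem

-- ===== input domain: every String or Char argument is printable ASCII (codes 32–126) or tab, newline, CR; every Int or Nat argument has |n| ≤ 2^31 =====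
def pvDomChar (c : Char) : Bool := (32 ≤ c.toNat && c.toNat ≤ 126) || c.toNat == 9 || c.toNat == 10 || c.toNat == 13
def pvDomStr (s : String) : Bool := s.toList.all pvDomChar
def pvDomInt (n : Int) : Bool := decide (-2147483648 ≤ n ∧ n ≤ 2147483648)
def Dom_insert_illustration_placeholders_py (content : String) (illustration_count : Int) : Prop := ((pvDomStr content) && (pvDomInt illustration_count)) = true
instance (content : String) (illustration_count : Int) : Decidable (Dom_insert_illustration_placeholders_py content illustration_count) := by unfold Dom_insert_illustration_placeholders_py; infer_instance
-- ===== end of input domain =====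

-- B rebuilds the heading branch as a single merge pass over the lines against a
-- precomputed sorted queue of insert positions (no mutable offset, no repeated list.insert);
-- objective: alternative decomposition, same exact output.

-- f"[插图{n}]" (shared trivial formatting helper of both ports)
def pvLabel (n : Int) : String := "[插图" ++ PySem.Int.toStr n ++ "]"

-- ===== PORT A =====
def insert_illustration_placeholders_py (content : String) (illustration_count : Int) : String :=
  if illustration_count ≤ 0 then content
  else
    let lines := PySem.Str.splitlines content
    let heading_indexes := ((PySem.List.enumerate lines 0).filter
        (fun p => PySem.Str.startswith p.2 "## ")).map (fun p => p.1)
    if heading_indexes = [] then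
      let suffix := if PySem.Str.strip content ≠ "" then "\n\n" else ""
      let placeholders := PySem.Str.join "\n\n"
        ((PySem.List.pyRange 1 (illustration_count + 1) 1).map (fun index => pvLabel index))
      PySem.Str.strip (content ++ suffix ++ placeholders)
    else
      let inserts := (PySem.List.pyRange 0 illustration_count 1).map (fun idx =>
        let heading_index := PySem.List.pyGetD heading_indexes
          (min idx ((heading_indexes.length : Int) - 1)) 0
        let insert_at := if heading_index + 1 < (lines.length : Int)
          then heading_index + 2 else heading_index + 1
        (insert_at, pvLabel (idx + 1)))
      let res := inserts.foldl (fun (st : List String × Int) ins =>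
          (PySem.List.insert (PySem.List.insert st.1 (ins.1 + st.2) "") (ins.1 + st.2 + 1) ins.2,
           st.2 + 2)) (lines, 0)
      PySem.Str.join "\n" res.1

-- ===== PORT B =====
-- inner 'while j < len(positions) and positions[j] == i' loop: emits ("", label) pairs,
-- returns the emitted lines, the advanced counter j and the remaining queue
def pvAltEmit (i : Int) (j : Int) : List Int → List String × Int × List Int
  | [] => ([], j, [])
  | p :: rest =>
      if p = i then
        let e := pvAltEmit i (j + 1) rest
        ("" :: pvLabel (j + 1) :: e.1, e.2)
      else ([], j, p :: rest)

-- the 'for i, line in enumerate(lines)' merge pass plus the trailing drain loop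
def pvAltGo (lines : List String) (i : Int) (j : Int) (q : List Int) : List String :=
  match lines with
  | [] => (PySem.List.enumerate q j).flatMap (fun x => ["", pvLabel (x.1 + 1)])
  | l :: ls =>
      let e := pvAltEmit i j q
      e.1 ++ l :: pvAltGo ls (i + 1) e.2.1 e.2.2

def insert_illustration_placeholders_py_alt (content : String) (illustration_count : Int) : String :=
  if illustration_count ≤ 0 then content
  else
    let lines := PySem.Str.splitlines content
    let headings := ((PySem.List.enumerate lines 0).filter
        (fun p => PySem.Str.startswith p.2 "## ")).map (fun p => p.1)
    if headings = [] then
      let suffix := if PySem.Str.strip content ≠ "" then "\n\n" else ""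
      let placeholders := PySem.Str.join "\n\n"
        ((PySem.List.pyRange 1 (illustration_count + 1) 1).map (fun index => pvLabel index))
      PySem.Str.strip (content ++ suffix ++ placeholders)
    else
      let last := PySem.List.pyGetD headings (-1) 0
      let positions := (PySem.List.pyRange 0 illustration_count 1).map (fun idx =>
        let heading := if idx < (headings.length : Int)
          then PySem.List.pyGetD headings idx 0 else last
        if heading + 1 < (lines.length : Int) then heading + 2 else heading + 1)
      PySem.Str.join "\n" (pvAltGo lines 0 0 positions)

-- ===== PRECONDITION & SPEC =====
def Spec_insert_illustration_placeholders_py (content : String) (illustration_count : Int) (out : String) : Prop := out = insert_illustration_placeholders_py_alt content illustration_count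
instance (content : String) (illustration_count : Int) (out : String) : Decidable (Spec_insert_illustration_placeholders_py content illustration_count out) := by unfold Spec_insert_illustration_placeholders_py; infer_instance

-- ===== CLAIM (what is proved, stated in full; the proofs are below) =====
def Claim_equal_insert_illustration_placeholders_py : Prop := ∀ (content : String) (illustration_count : Int), Dom_insert_illustration_placeholders_py content illustration_count → Spec_insert_illustration_placeholders_py content illustration_count (insert_illustration_placeholders_py content illustration_count)

-- ===== LEMMAS AND PROOFS =====

-- proof-only canonical merge over a queue of (position, text) pairs
def pvEmitP (i : Int) : List (Int × String) → List String × List (Int × String)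
  | [] => ([], [])
  | (p, s) :: rest =>
      if p = i then
        let e := pvEmitP i rest
        ("" :: s :: e.1, e.2)
      else ([], (p, s) :: rest)

def pvMergeP : List String → Int → List (Int × String) → List String
  | [], _, q => q.flatMap (fun x => ["", x.2])
  | l :: ls, i, q => (pvEmitP i q).1 ++ l :: pvMergeP ls (i + 1) (pvEmitP i q).2

-- queue of bare positions with counter j, as (position, label) pairs
def pvPairs (j : Int) (q : List Int) : List (Int × String) :=
  (PySem.List.enumerate q j).map (fun x => (x.2, pvLabel (x.1 + 1)))

theorem pvAltEmit_eq (i : Int) (q : List Int) : ∀ (j : Int),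
    (pvAltEmit i j q).1 = (pvEmitP i (pvPairs j q)).1 ∧
    pvPairs (pvAltEmit i j q).2.1 (pvAltEmit i j q).2.2 = (pvEmitP i (pvPairs j q)).2 := by
  induction q with
  | nil => intro j; simp [pvAltEmit, pvPairs, PySem.List.enumerate_nil, pvEmitP]
  | cons p rest ih =>
      intro j
      by_cases h : p = i
      · simp only [pvAltEmit, pvPairs, PySem.List.enumerate_cons, List.map_cons, pvEmitP,
          if_pos h]
        refine ⟨?_, ?_⟩
        · simp only [List.cons.injEq, true_and]
          exact (ih (j + 1)).1
        · exact (ih (j + 1)).2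
      · simp [pvAltEmit, pvPairs, PySem.List.enumerate_cons, pvEmitP, h]

theorem pvAltGo_eq (lines : List String) : ∀ (i j : Int) (q : List Int),
    pvAltGo lines i j q = pvMergeP lines i (pvPairs j q) := by
  induction lines with
  | nil =>
      intro i j q
      simp only [pvAltGo, pvMergeP, pvPairs, List.flatMap_map]
  | cons l ls ih =>
      intro i j q
      simp only [pvAltGo, pvMergeP]
      rw [(pvAltEmit_eq i q j).1, ← (pvAltEmit_eq i q j).2, ih]

theorem pvMergeP_nil : ∀ (suf : List String) (i : Int), pvMergeP suf i [] = suf := by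
  intro suf
  induction suf with
  | nil => intro i; simp [pvMergeP]
  | cons l ls ih => intro i; simp [pvMergeP, pvEmitP, ih]

-- A's insert loop (abstracted over its inserts list)
def pvFoldA (ins : List (Int × String)) (st : List String × Int) : List String × Int :=
  ins.foldl (fun (st : List String × Int) ins =>
    (PySem.List.insert (PySem.List.insert st.1 (ins.1 + st.2) "") (ins.1 + st.2 + 1) ins.2,
     st.2 + 2)) st

theorem pvMergeP_cons (p : Int) (s : String) (rest : List (Int × String)) :
    ∀ (suf : List String) (i : Int), i ≤ p → p ≤ i + suf.length →
    pvMergeP suf i ((p, s) :: rest) =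
      suf.take (p - i).toNat ++ "" :: s :: pvMergeP (suf.drop (p - i).toNat) p rest := by
  intro suf
  induction suf with
  | nil =>
      intro i h1 h2
      have hpi : p = i := by simp at h2; omega
      subst hpi
      simp [pvMergeP]
  | cons l ls ih =>
      intro i h1 h2
      by_cases h : p = i
      · subst h
        simp [pvMergeP, pvEmitP]
      · have hlt : i < p := lt_of_le_of_ne h1 (fun hh => h hh.symm)
        have hd : (p - i).toNat = (p - (i + 1)).toNat + 1 := by omega
        simp only [pvMergeP, pvEmitP, if_neg h, List.nil_append]
        rw [ih (i + 1) (by omega) (by simp at h2 ⊢; omega), hd, List.take_succ_cons,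
          List.drop_succ_cons, List.cons_append]

theorem pvFoldA_merge (ins : List (Int × String)) :
    ∀ (pre suf : List String) (i : Int),
    ins.Pairwise (fun a b => a.1 ≤ b.1) →
    (∀ x ∈ ins, i ≤ x.1 ∧ x.1 ≤ i + suf.length) →
    (pvFoldA ins (pre ++ suf, (pre.length : Int) - i)).1 = pre ++ pvMergeP suf i ins := by
  induction ins with
  | nil => intro pre suf i _ _; simp [pvFoldA, pvMergeP_nil]
  | cons hd rest ih =>
      intro pre suf i hpw hbd
      obtain ⟨p, s⟩ := hd
      have hps := hbd (p, s) (by simp)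
      have h1 : i ≤ p := hps.1
      have h2 : p ≤ i + suf.length := hps.2
      have hrest := List.pairwise_cons.mp hpw
      set d : Nat := (p - i).toNat with hdd
      have hdle : d ≤ suf.length := by omega
      have hidx1 : p + ((pre.length : Int) - i) = ((pre.length + d : Nat) : Int) := by
        push_cast; omega
      have step1 : PySem.List.insert (pre ++ suf) (p + ((pre.length : Int) - i)) ""
          = pre ++ suf.take d ++ "" :: suf.drop d := by
        rw [hidx1, PySem.List.insert_natCast _ _ _ (by simp; omega),
          List.take_length_add_append, List.drop_length_add_append, List.append_assoc]
      have hlen1 : (pre ++ suf.take d ++ [""]).length = pre.length + d + 1 := by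
        simp only [List.length_append, List.length_take, List.length_cons, List.length_nil]
        omega
      have split1 : pre ++ suf.take d ++ "" :: suf.drop d
          = (pre ++ suf.take d ++ [""]) ++ suf.drop d := by simp
      have hidx2 : p + ((pre.length : Int) - i) + 1 = (((pre ++ suf.take d ++ [""]).length : Nat) : Int) := by
        simp only [List.length_append, List.length_take, List.length_cons, List.length_nil]
        push_cast [min_eq_left hdle]; omega
      have step2 : PySem.List.insert (pre ++ suf.take d ++ "" :: suf.drop d)
            (p + ((pre.length : Int) - i) + 1) s
          = (pre ++ suf.take d ++ ["", s]) ++ suf.drop d := by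
        rw [split1, hidx2, PySem.List.insert_natCast _ _ _ (by simp),
          List.take_left, List.drop_left]
        simp
      have hlen2 : ((pre ++ suf.take d ++ ["", s]).length : Int) - p
          = (pre.length : Int) - i + 2 := by
        simp only [List.length_append, List.length_take, List.length_cons, List.length_nil]
        push_cast [min_eq_left hdle]; omega
      have hfold : pvFoldA ((p, s) :: rest) (pre ++ suf, (pre.length : Int) - i)
          = pvFoldA rest ((pre ++ suf.take d ++ ["", s]) ++ suf.drop d,
              ((pre ++ suf.take d ++ ["", s]).length : Int) - p) := by
        simp only [pvFoldA, List.foldl_cons, step1, step2, hlen2]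
      rw [hfold, ih _ _ p hrest.2 ?bounds, pvMergeP_cons p s rest suf i h1 h2]
      · simp [hdd]
      case bounds =>
        intro x hx
        refine ⟨hrest.1 x hx, ?_⟩
        have := (hbd x (by simp [hx])).2
        simp only [List.length_drop]
        omega


theorem pvPairs_map_pyRange (f : Int → Int) (n : Nat) : ∀ (a b : Int), (b - a).toNat = n →
    pvPairs a ((PySem.List.pyRange a b 1).map f)
      = (PySem.List.pyRange a b 1).map (fun idx => (f idx, pvLabel (idx + 1))) := by
  induction n with
  | zero =>
      intro a b h
      rw [PySem.List.pyRange_one_eq_nil (by omega)]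
      simp [pvPairs, PySem.List.enumerate_nil]
  | succ m ih =>
      intro a b h
      rw [PySem.List.pyRange_one_cons (by omega)]
      simp only [List.map_cons, pvPairs, PySem.List.enumerate_cons]
      have := ih (a + 1) b (by omega)
      simp only [pvPairs] at this
      rw [this]

-- the heading branch: A's offset/insert fold equals B's merge pass
theorem pvHeadBranch (lines : List String) (H : List Int) (cnt : Int)
    (hne : H ≠ [])
    (hsorted : H.Pairwise (· < ·))
    (hmem : ∀ h ∈ H, 0 ≤ h ∧ h < (lines.length : Int)) :
    (pvFoldA ((PySem.List.pyRange 0 cnt 1).map (fun idx =>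
        (if PySem.List.pyGetD H (min idx ((H.length : Int) - 1)) 0 + 1 < (lines.length : Int)
          then PySem.List.pyGetD H (min idx ((H.length : Int) - 1)) 0 + 2
          else PySem.List.pyGetD H (min idx ((H.length : Int) - 1)) 0 + 1,
         pvLabel (idx + 1)))) (lines, 0)).1
    = pvAltGo lines 0 0 ((PySem.List.pyRange 0 cnt 1).map (fun idx =>
        if (if idx < (H.length : Int) then PySem.List.pyGetD H idx 0
            else PySem.List.pyGetD H (-1) 0) + 1 < (lines.length : Int)
          then (if idx < (H.length : Int) then PySem.List.pyGetD H idx 0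
            else PySem.List.pyGetD H (-1) 0) + 2
          else (if idx < (H.length : Int) then PySem.List.pyGetD H idx 0
            else PySem.List.pyGetD H (-1) 0) + 1)) := by
  have hk : 0 < H.length := List.length_pos_iff.mpr hne
  -- the element A selects is in range and monotone in the query index
  have hselmem : ∀ (m : Int), 0 ≤ m → m ≤ (H.length : Int) - 1 →
      0 ≤ PySem.List.pyGetD H m 0 ∧ PySem.List.pyGetD H m 0 < (lines.length : Int) := by
    intro m h1 h2
    rw [PySem.List.pyGetD_eq_getElem H 0 h1 (by omega)]
    exact hmem _ (List.getElem_mem _)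
  have hselmono : ∀ (m1 m2 : Int), 0 ≤ m1 → m1 ≤ m2 → m2 ≤ (H.length : Int) - 1 →
      PySem.List.pyGetD H m1 0 ≤ PySem.List.pyGetD H m2 0 := by
    intro m1 m2 h1 h2 h3
    rw [PySem.List.pyGetD_eq_getElem H 0 h1 (by omega),
      PySem.List.pyGetD_eq_getElem H 0 (by omega) (by omega)]
    rcases eq_or_lt_of_le h2 with he | hl
    · subst he; exact le_refl _
    · exact le_of_lt (List.pairwise_iff_getElem.mp hsorted m1.toNat m2.toNat (by omega)
        (by omega) (by omega))
  have hA := pvFoldA_merge ((PySem.List.pyRange 0 cnt 1).map (fun idx =>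
        (if PySem.List.pyGetD H (min idx ((H.length : Int) - 1)) 0 + 1 < (lines.length : Int)
          then PySem.List.pyGetD H (min idx ((H.length : Int) - 1)) 0 + 2
          else PySem.List.pyGetD H (min idx ((H.length : Int) - 1)) 0 + 1,
         pvLabel (idx + 1)))) [] lines 0 ?pw ?bd
  case pw =>
    rw [List.pairwise_iff_getElem]
    intro u v hu hv huv
    simp only [List.getElem_map, PySem.List.getElem_pyRange_one, zero_add]
    have hvlt : (v : Int) < cnt := by
      have := hv; simp only [List.length_map, PySem.List.length_pyRange_one] at this; omega
    have hm : PySem.List.pyGetD H (min (u : Int) ((H.length : Int) - 1)) 0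
        ≤ PySem.List.pyGetD H (min (v : Int) ((H.length : Int) - 1)) 0 := by
      apply hselmono <;> omega
    have b1 := hselmem (min (u : Int) ((H.length : Int) - 1)) (by omega) (by omega)
    have b2 := hselmem (min (v : Int) ((H.length : Int) - 1)) (by omega) (by omega)
    split_ifs <;> omega
  case bd =>
    intro x hx
    simp only [List.mem_map] at hx
    obtain ⟨idx, hidx, rfl⟩ := hx
    rw [PySem.List.mem_pyRange_one] at hidx
    have b1 := hselmem (min idx ((H.length : Int) - 1)) (by omega) (by omega)
    split_ifs <;> constructor <;> omega
  rw [pvAltGo_eq]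
  rw [pvPairs_map_pyRange _ (cnt - 0).toNat _ _ rfl]
  simp only [List.nil_append, List.length_nil, Nat.cast_zero, zero_sub, neg_zero] at hA
  rw [hA]
  congr 1
  apply List.map_congr_left
  intro idx hidx
  rw [PySem.List.mem_pyRange_one] at hidx
  have hsame : PySem.List.pyGetD H (min idx ((H.length : Int) - 1)) 0
      = (if idx < (H.length : Int) then PySem.List.pyGetD H idx 0
         else PySem.List.pyGetD H (-1) 0) := by
    by_cases hlt : idx < (H.length : Int)
    · rw [if_pos hlt, min_eq_left (by omega)]
    · rw [if_neg hlt, min_eq_right (by omega), PySem.List.pyGetD_neg_one H 0 hne,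
        PySem.List.pyGetD_eq_getElem H 0 (by omega) (by omega), List.getLast_eq_getElem hne]
      congr 1
      omega
  rw [hsame]

-- ===== VERDICT (by name: the statement is the Claim_ definition above) =====
theorem insert_illustration_placeholders_py_spec : Claim_equal_insert_illustration_placeholders_py := by
  intro content cnt _
  unfold Spec_insert_illustration_placeholders_py
  unfold insert_illustration_placeholders_py insert_illustration_placeholders_py_alt
  by_cases h0 : cnt ≤ 0
  · simp only [if_pos h0]
  · simp only [if_neg h0]
    set lines := PySem.Str.splitlines content with hlines
    set H := ((PySem.List.enumerate lines 0).filter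
      (fun p => PySem.Str.startswith p.2 "## ")).map (fun p => p.1) with hHdef
    by_cases hH : H = []
    · simp only [if_pos hH]
    · simp only [if_neg hH]
      congr 1
      have hsorted : H.Pairwise (· < ·) := by
        rw [hHdef]
        exact List.Pairwise.map _ (fun a b h => h)
          (List.Pairwise.filter _ (PySem.List.pairwise_lt_enumerate lines 0))
      have hmem : ∀ h ∈ H, 0 ≤ h ∧ h < (lines.length : Int) := by
        intro h hm
        rw [hHdef, List.mem_map] at hm
        obtain ⟨p, hp, rfl⟩ := hm
        have hp2 := List.mem_of_mem_filter hp
        rw [PySem.List.mem_enumerate_iff] at hp2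
        obtain ⟨k, hk, rfl⟩ := hp2
        simp
        omega
      exact pvHeadBranch lines H cnt hH hsorted hmem
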